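-- pv_equiv track=rewrite | github.com/Ashwini-developer/Agentic-AI-Rooters | app.py | is_stable_customer
-- ===== SOURCE A (Python) =====
-- def is_stable_customer(bank_txns):
--     salary_dates = set()
--     investment_count = 0
--     missed_payments = 0
--     for txn in bank_txns:
--         amount, narration, date, ttype, mode, balance = txn
--         if ttype == 1 and 'SALARY' in narration.upper():
--             salary_dates.add(date[:7])  # YYYY-MM
--         if 'SIP' in narration.upper() or 'MF' in narration.upper() or 'ETF' in narration.upper():
--             investment_count += 1
--         if 'BOUNCE' in narration.upper() or 'FAILED' in narration.upper():
--             missed_payments += 1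
--     return len(salary_dates) >= 2 and investment_count >= 2 and missed_payments == 0
-- ===== SOURCE B (Python) =====
-- def is_stable_customer(bank_txns):
--     # Witness search with early exit instead of exhaustive counting:
--     # stop at the first bounce, at the second investment, at the second distinct salary month.
--     def clean(txns):
--         for txn in txns:
--             up = txn[1].upper()
--             if 'BOUNCE' in up or 'FAILED' in up:
--                 return False
--         return True
--
--     def second_investment(txns):
--         seen = False
--         for txn in txns:
--             up = txn[1].upper()
--             if 'SIP' in up or 'MF' in up or 'ETF' in up:
--                 if seen:
--                     return True
--                 seen = True
--         return False
--
--     def two_distinct_months(txns):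
--         first = None
--         for txn in txns:
--             if txn[3] == 1 and 'SALARY' in txn[1].upper():
--                 m = txn[2][:7]
--                 if first is None:
--                     first = m
--                 elif m != first:
--                     return True
--         return False
--
--     return clean(bank_txns) and second_investment(bank_txns) and two_distinct_months(bank_txns)
-- ===== Notes on version B (the rewrite author's own statement) =====
-- stated objective: alternative
-- what changed: Replaced A's exhaustive counting (full scan maintaining a month set and two counters, then threshold tests) with short-circuiting witness searches: return False at the first bounce/failed record, and decide the thresholds by finding a second investment record and a second distinct salary month, each stopping as soon as its witness is found.
import Mathlib
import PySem

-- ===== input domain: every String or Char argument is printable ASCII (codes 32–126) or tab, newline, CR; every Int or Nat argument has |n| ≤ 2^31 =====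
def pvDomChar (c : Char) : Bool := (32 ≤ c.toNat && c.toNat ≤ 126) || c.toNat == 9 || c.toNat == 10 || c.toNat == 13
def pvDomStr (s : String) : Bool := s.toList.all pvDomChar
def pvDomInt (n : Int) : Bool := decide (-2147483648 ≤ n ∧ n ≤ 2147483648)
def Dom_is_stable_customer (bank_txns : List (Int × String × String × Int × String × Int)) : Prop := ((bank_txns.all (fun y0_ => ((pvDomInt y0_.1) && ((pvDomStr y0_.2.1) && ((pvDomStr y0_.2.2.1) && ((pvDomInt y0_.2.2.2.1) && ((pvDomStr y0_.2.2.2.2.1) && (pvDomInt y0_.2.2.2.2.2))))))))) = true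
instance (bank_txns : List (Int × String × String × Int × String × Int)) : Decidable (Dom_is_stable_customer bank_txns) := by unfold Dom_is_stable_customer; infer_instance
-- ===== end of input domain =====

-- B replaces A's exhaustive counting pass with short-circuiting witness searches
-- (first bounce, second investment, second distinct salary month); objective: alternative.


-- ===== PORT A =====
-- literal port of A's single loop: state = (salary_dates set, investment_count, missed_payments)
def pvStepA (acc : PySem.Set String × Int × Int)
    (txn : Int × String × String × Int × String × Int) : PySem.Set String × Int × Int :=
  let narration := txn.2.1
  let date := txn.2.2.1
  let ttype := txn.2.2.2.1
  let acc1 := if ttype == 1 && PySem.Str.isIn "SALARY" (PySem.Str.upper narration)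
              then (PySem.Set.add acc.1 (PySem.Str.slice date none (some 7)), acc.2.1, acc.2.2)
              else acc
  let acc2 := if PySem.Str.isIn "SIP" (PySem.Str.upper narration)
               || PySem.Str.isIn "MF" (PySem.Str.upper narration)
               || PySem.Str.isIn "ETF" (PySem.Str.upper narration)
              then (acc1.1, acc1.2.1 + 1, acc1.2.2)
              else acc1
  if PySem.Str.isIn "BOUNCE" (PySem.Str.upper narration)
      || PySem.Str.isIn "FAILED" (PySem.Str.upper narration)
  then (acc2.1, acc2.2.1, acc2.2.2 + 1)
  else acc2

def is_stable_customer (bank_txns : List (Int × String × String × Int × String × Int)) : Bool :=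
  let st := bank_txns.foldl pvStepA (PySem.Set.empty, 0, 0)
  decide (2 ≤ PySem.Set.len st.1) && decide ((2 : Int) ≤ st.2.1) && (st.2.2 == 0)

-- ===== PORT B =====
-- clean(txns): early return False at the first bounce/failed record
def pvClean : List (Int × String × String × Int × String × Int) → Bool
  | [] => true
  | t :: ts =>
    if PySem.Str.isIn "BOUNCE" (PySem.Str.upper t.2.1)
        || PySem.Str.isIn "FAILED" (PySem.Str.upper t.2.1)
    then false else pvClean ts

-- second_investment(txns): early return True at the second investment record (seen = loop flag)
def pvSecondInvestment : List (Int × String × String × Int × String × Int) → Bool → Bool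
  | [], _ => false
  | t :: ts, seen =>
    if PySem.Str.isIn "SIP" (PySem.Str.upper t.2.1)
        || PySem.Str.isIn "MF" (PySem.Str.upper t.2.1)
        || PySem.Str.isIn "ETF" (PySem.Str.upper t.2.1)
    then (if seen then true else pvSecondInvestment ts true)
    else pvSecondInvestment ts seen

-- two_distinct_months(txns): early return True at the second distinct salary month (first = loop state)
def pvTwoDistinctMonths : List (Int × String × String × Int × String × Int) → Option String → Bool
  | [], _ => false
  | t :: ts, first =>
    if t.2.2.2.1 == 1 && PySem.Str.isIn "SALARY" (PySem.Str.upper t.2.1) then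
      let m := PySem.Str.slice t.2.2.1 none (some 7)
      match first with
      | none => pvTwoDistinctMonths ts (some m)
      | some f => if m != f then true else pvTwoDistinctMonths ts (some f)
    else pvTwoDistinctMonths ts first

def is_stable_customer_alt (bank_txns : List (Int × String × String × Int × String × Int)) : Bool :=
  pvClean bank_txns && pvSecondInvestment bank_txns false && pvTwoDistinctMonths bank_txns none

-- ===== PRECONDITION & SPEC =====
def Spec_is_stable_customer (bank_txns : List (Int × String × String × Int × String × Int)) (out : Bool) : Prop := out = is_stable_customer_alt bank_txns
instance (bank_txns : List (Int × String × String × Int × String × Int)) (out : Bool) : Decidable (Spec_is_stable_customer bank_txns out) := by unfold Spec_is_stable_customer; infer_instance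

-- ===== CLAIM =====
def Claim_equal_is_stable_customer : Prop := ∀ (bank_txns : List (Int × String × String × Int × String × Int)), Dom_is_stable_customer bank_txns → Spec_is_stable_customer bank_txns (is_stable_customer bank_txns)

-- ===== LEMMAS AND PROOFS =====

-- the salary-month comprehension list, and the two keyword predicates (proof helpers)
def pvSal (bank_txns : List (Int × String × String × Int × String × Int)) : List String :=
  bank_txns.filterMap (fun txn =>
    if txn.2.2.2.1 == 1 && PySem.Str.isIn "SALARY" (PySem.Str.upper txn.2.1)
    then some (PySem.Str.slice txn.2.2.1 none (some 7)) else none)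

def pvInvP (txn : Int × String × String × Int × String × Int) : Bool :=
  PySem.Str.isIn "SIP" (PySem.Str.upper txn.2.1)
   || PySem.Str.isIn "MF" (PySem.Str.upper txn.2.1)
   || PySem.Str.isIn "ETF" (PySem.Str.upper txn.2.1)

def pvMissP (txn : Int × String × String × Int × String × Int) : Bool :=
  PySem.Str.isIn "BOUNCE" (PySem.Str.upper txn.2.1)
   || PySem.Str.isIn "FAILED" (PySem.Str.upper txn.2.1)

-- A's fold decomposes into the three independent aggregates
theorem pvFold_decomp (l : List (Int × String × String × Int × String × Int))
    (s : PySem.Set String) (i m : Int) :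
    l.foldl pvStepA (s, i, m)
      = (List.foldl PySem.Set.add s (pvSal l), i + (l.countP pvInvP : Int),
         m + (l.countP pvMissP : Int)) := by
  induction l generalizing s i m with
  | nil => simp [pvSal]
  | cons t ts ih =>
    have hA : pvStepA (s, i, m) t =
        ((if t.2.2.2.1 == 1 && PySem.Str.isIn "SALARY" (PySem.Str.upper t.2.1)
          then PySem.Set.add s (PySem.Str.slice t.2.2.1 none (some 7)) else s),
         i + (if pvInvP t then 1 else 0), m + (if pvMissP t then 1 else 0)) := by
      simp only [pvStepA, pvInvP, pvMissP]
      split_ifs <;> simp_all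
    rw [List.foldl_cons, hA, ih]
    simp only [pvSal, List.filterMap_cons, List.countP_cons, Prod.mk.injEq]
    refine ⟨?_, ?_, ?_⟩
    · split_ifs <;> simp [List.foldl_cons]
    · split_ifs <;> simp <;> omega
    · split_ifs <;> simp <;> omega

-- clean ⟺ no bounce/failed record
theorem pvClean_eq (l : List (Int × String × String × Int × String × Int)) :
    pvClean l = ! l.any pvMissP := by
  induction l with
  | nil => rfl
  | cons t ts ih =>
    have e : pvClean (t :: ts) = if pvMissP t then false else pvClean ts := rfl
    rw [e, List.any_cons]
    cases h : pvMissP t <;> simp [ih]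

-- the seen-flag automaton decides "count (+ flag) reaches 2"
theorem pvSecondInvestment_eq (l : List (Int × String × String × Int × String × Int)) (seen : Bool) :
    pvSecondInvestment l seen
      = decide (2 ≤ (if seen then 1 else 0) + l.countP pvInvP) := by
  induction l generalizing seen with
  | nil => cases seen <;> simp [pvSecondInvestment]
  | cons t ts ih =>
    have e : pvSecondInvestment (t :: ts) seen =
        if pvInvP t then (if seen then true else pvSecondInvestment ts true)
        else pvSecondInvestment ts seen := rfl
    cases h : pvInvP t
    · rw [e, List.countP_cons, h, if_neg (by simp), ih, decide_eq_decide]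
      cases seen <;> simp
    · rw [e, List.countP_cons, h, if_pos rfl]
      cases seen
      · rw [if_neg (by simp), ih, decide_eq_decide]
        simp only [Bool.false_eq_true, if_false]
        omega
      · rw [if_pos rfl]
        symm
        rw [decide_eq_true_iff]
        simp
        omega

-- unfolding helpers for the salary-month automaton and the comprehension list
theorem pvTwoD_cons (t : Int × String × String × Int × String × Int)
    (ts : List (Int × String × String × Int × String × Int)) (first : Option String) :
    pvTwoDistinctMonths (t :: ts) first =
      if (t.2.2.2.1 == 1 && PySem.Str.isIn "SALARY" (PySem.Str.upper t.2.1)) = true then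
        (match first with
         | none => pvTwoDistinctMonths ts (some (PySem.Str.slice t.2.2.1 none (some 7)))
         | some f => if (PySem.Str.slice t.2.2.1 none (some 7) != f) = true then true
                     else pvTwoDistinctMonths ts (some f))
      else pvTwoDistinctMonths ts first := rfl

theorem pvSal_cons (t : Int × String × String × Int × String × Int)
    (ts : List (Int × String × String × Int × String × Int)) :
    pvSal (t :: ts) =
      if (t.2.2.2.1 == 1 && PySem.Str.isIn "SALARY" (PySem.Str.upper t.2.1)) = true then
        PySem.Str.slice t.2.2.1 none (some 7) :: pvSal ts
      else pvSal ts := by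
  by_cases h : (t.2.2.2.1 == 1 && PySem.Str.isIn "SALARY" (PySem.Str.upper t.2.1)) = true
  · rw [if_pos h]
    simp only [pvSal, List.filterMap_cons]
    rw [if_pos h]
  · rw [if_neg h]
    simp only [pvSal, List.filterMap_cons]
    rw [if_neg h]

-- with a first month fixed, the automaton is "some later salary month differs"
theorem pvTwoDistinct_some (l : List (Int × String × String × Int × String × Int)) (f : String) :
    pvTwoDistinctMonths l (some f) = (pvSal l).any (fun x => x != f) := by
  induction l with
  | nil => rfl
  | cons t ts ih =>
    rw [pvTwoD_cons, pvSal_cons]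
    by_cases h : (t.2.2.2.1 == 1 && PySem.Str.isIn "SALARY" (PySem.Str.upper t.2.1)) = true
    · rw [if_pos h, if_pos h]
      dsimp only
      rw [List.any_cons]
      cases hb : (PySem.Str.slice t.2.2.1 none (some 7) != f)
      · rw [if_neg (by simp), ih]
        simp
      · simp
    · rw [if_neg h, if_neg h, ih]

-- from the empty state: some salary month differs from the first one
theorem pvTwoDistinct_none (l : List (Int × String × String × Int × String × Int)) :
    pvTwoDistinctMonths l none
      = (match pvSal l with | [] => false | a :: r => r.any (fun x => x != a)) := by
  induction l with
  | nil => rfl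
  | cons t ts ih =>
    rw [pvTwoD_cons, pvSal_cons]
    by_cases h : (t.2.2.2.1 == 1 && PySem.Str.isIn "SALARY" (PySem.Str.upper t.2.1)) = true
    · rw [if_pos h, if_pos h]
      exact pvTwoDistinct_some ts (PySem.Str.slice t.2.2.1 none (some 7))
    · rw [if_neg h, if_neg h, ih]

-- the deduplicated month set reaches size 2 iff some month differs from the first
theorem pvSetLen_two (sal : List String) :
    decide (2 ≤ PySem.Set.len (PySem.Set.ofList sal))
      = (match sal with | [] => false | a :: r => r.any (fun x => x != a)) := by
  cases sal with
  | nil => rfl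
  | cons a r =>
    rw [PySem.Set.ofList_cons]
    simp only [PySem.Set.len, List.length_cons]
    rcases Decidable.em (∃ x ∈ r, x ≠ a) with ⟨x, hx, hxa⟩ | hno
    · have hxd : x ∈ PySem.Set.discard (PySem.Set.ofList r) a :=
        (PySem.Set.mem_discard _ _ _).mpr ⟨(PySem.Set.mem_ofList _ _).mpr hx, hxa⟩
      have hlen : 1 ≤ (PySem.Set.discard (PySem.Set.ofList r) a).length :=
        List.length_pos_iff.mpr (by intro hnil; rw [hnil] at hxd; cases hxd)
      have hany : r.any (fun x => x != a) = true :=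
        List.any_eq_true.mpr ⟨x, hx, by simp [hxa]⟩
      rw [hany]
      simp only [decide_eq_true_eq]
      push_cast
      omega
    · have hd : PySem.Set.discard (PySem.Set.ofList r) a = [] := by
        apply List.eq_nil_iff_forall_not_mem.mpr
        intro x hx
        have := (PySem.Set.mem_discard _ _ _).mp hx
        exact hno ⟨x, (PySem.Set.mem_ofList _ _).mp this.1, this.2⟩
      have hany : r.any (fun x => x != a) = false := by
        apply List.any_eq_false.mpr
        intro x hx
        have hxa : x = a := by by_contra hne; exact hno ⟨x, hx, hne⟩
        simp [hxa]
      rw [hd, hany]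
      rfl

-- ===== VERDICT =====
theorem is_stable_customer_spec : Claim_equal_is_stable_customer := by
  intro bank_txns _
  unfold Spec_is_stable_customer is_stable_customer is_stable_customer_alt
  rw [show PySem.Set.empty = ([] : PySem.Set String) from rfl]
  rw [pvFold_decomp, pvClean_eq, pvSecondInvestment_eq, pvTwoDistinct_none]
  rw [show List.foldl PySem.Set.add ([] : PySem.Set String) (pvSal bank_txns)
        = PySem.Set.ofList (pvSal bank_txns) from (PySem.Set.ofList_eq_foldl _).symm]
  dsimp only
  rw [pvSetLen_two]
  simp only [zero_add]
  have hmiss : (((bank_txns.countP pvMissP : Int)) == 0) = ! bank_txns.any pvMissP := by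
    cases h : bank_txns.any pvMissP
    · have h0 : bank_txns.countP pvMissP = 0 :=
        List.countP_eq_zero.mpr (fun x hx => by
          have := List.any_eq_false.mp h x hx; simpa using this)
      simp [h0]
    · have hp : bank_txns.countP pvMissP ≠ 0 := by
        intro h0
        rcases List.any_eq_true.mp h with ⟨x, hx, hpx⟩
        exact absurd hpx (by simpa using List.countP_eq_zero.mp h0 x hx)
      simp only [Bool.not_true, beq_eq_false_iff_ne, ne_eq]
      intro hc
      omega
  have hinv : decide ((2 : Int) ≤ (bank_txns.countP pvInvP : Int))
      = decide (2 ≤ (if (false : Bool) = true then 1 else 0) + bank_txns.countP pvInvP) := by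
    rw [decide_eq_decide]
    simp
  rw [hmiss, hinv]
  simp [Bool.and_comm, Bool.and_assoc]
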